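-- pv_equiv track=rewrite | github.com/beomwon/Algorithm | 프로그래머스/lv2/68936. 쿼드압축 후 개수 세기/쿼드압축 후 개수 세기.py | solution
-- ===== SOURCE A (Python) =====
-- def solution(arr):
--     answer = [0, 0, 0]
--     while len(arr) != 1:
--         _next = [[[0] for _ in range(len(arr)//2)] for _ in range(len(arr)//2)]
--         for i in range(0, len(arr), 2):
--             for j in range(0, len(arr), 2):
--                 _sum = [arr[i][j], arr[i+1][j], arr[i][j+1], arr[i+1][j+1]]
--                 if len(set(_sum)) != 1:
--                     answer[0] += _sum.count(0)
--                     answer[1] += _sum.count(1)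
--                     _next[i//2][j//2] = 2
--                 else:
--                     _next[i//2][j//2] = _sum[0]
--         arr = _next.copy()
--
--     answer[arr[0][0]] += 1
--     return answer[:2]
-- ===== SOURCE B (Python) =====
-- def solution(arr):
--     n = len(arr)
--     answer = [0, 0]
--
--     def rec(r, c, size):
--         v = arr[r][c]
--         if all(arr[r + i][c + j] == v for i in range(size) for j in range(size)):
--             if v == 0 or v == 1:
--                 answer[v] += 1
--             return
--         h = size // 2
--         rec(r, c, h)
--         rec(r, c + h, h)
--         rec(r + h, c, h)
--         rec(r + h, c + h, h)
--
--     rec(0, 0, n)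
--     return answer
-- ===== Notes on version B (the rewrite author's own statement) =====
-- stated objective: alternative
-- what changed: Replaces A's bottom-up while-loop, which repeatedly merges every 2x2 block into an ever-smaller grid with sentinel value 2 for mixed blocks, by a top-down recursive divide-and-conquer over the original grid that counts each maximal uniform 0-block / 1-block directly.
-- intended difference: On grids whose square prefix is uniformly -2 or -3, A's final answer[arr[0][0]] += 1 wraps around its 3-element answer list and reports a 1-block (resp. 0-block) that does not exist, returning [0,1] (resp. [1,0]); B returns the intended tally [0,0], since only values 0 and 1 are ever counted. — e.g. on solution([[-2]]): A returns [0, 1], B returns [0, 0]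
import Mathlib
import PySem

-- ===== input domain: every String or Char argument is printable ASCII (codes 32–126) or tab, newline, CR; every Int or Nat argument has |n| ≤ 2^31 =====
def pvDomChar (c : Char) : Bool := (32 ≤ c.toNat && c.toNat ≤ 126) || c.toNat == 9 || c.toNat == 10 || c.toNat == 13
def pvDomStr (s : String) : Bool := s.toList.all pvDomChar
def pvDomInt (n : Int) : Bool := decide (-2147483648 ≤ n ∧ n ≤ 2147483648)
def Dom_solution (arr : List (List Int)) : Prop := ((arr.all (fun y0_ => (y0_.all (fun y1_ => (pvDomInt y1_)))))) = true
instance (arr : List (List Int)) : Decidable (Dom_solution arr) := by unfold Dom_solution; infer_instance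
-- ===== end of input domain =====

-- B replaces A's bottom-up level-by-level 2x2 merging with a top-down recursive
-- divide-and-conquer that counts each maximal uniform 0-block / 1-block directly
-- (objective: alternative; same order of magnitude, no speed claim).

-- Shared grid accessor: arr[i][j] for the nonnegative indices both programs use
-- (in range inside Pre_, where neither Python raises an IndexError).
def gget (a : List (List Int)) (i j : Nat) : Int := (a.getD i []).getD j 0

-- ===== PORT A =====
-- _sum = [arr[i][j], arr[i+1][j], arr[i][j+1], arr[i+1][j+1]]
def cellList (arr : List (List Int)) (i j : Nat) : List Int :=
  [gget arr i j, gget arr (i+1) j, gget arr i (j+1), gget arr (i+1) (j+1)]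

-- body of the inner for-j loop of one pass (answer bumps and the _next-row cell)
def passRow (arr : List (List Int)) (i2 : Nat) (rst : List Int × List Int) (j2 : Nat) :
    List Int × List Int :=
  let s := cellList arr (2*i2) (2*j2)
  if (PySem.Set.ofList s).length ≠ 1 then
    let a0 := PySem.List.pySetD rst.1 0 (PySem.List.pyGetD rst.1 0 0 + (PySem.List.count s 0 : Int))
    let a1 := PySem.List.pySetD a0 1 (PySem.List.pyGetD a0 1 0 + (PySem.List.count s 1 : Int))
    (a1, rst.2 ++ [(2 : Int)])
  else
    (rst.1, rst.2 ++ [PySem.List.pyGetD s 0 0])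

-- body of the outer for-i loop: run a row, collect it as the next row of _next
-- (each _next cell is assigned exactly once, in row-major order, so the
-- assignments build the rows left to right)
def passOuter (arr : List (List Int)) (st : List Int × List (List Int)) (i2 : Nat) :
    List Int × List (List Int) :=
  let r := (List.range (arr.length / 2)).foldl (passRow arr i2) (st.1, ([] : List Int))
  (r.1, st.2 ++ [r.2])

-- the while-loop of A; fuel bounds the number of iterations (one per halving;
-- arr.length + 1 is always enough inside Pre_, where the loop terminates)
def solGo : Nat → List (List Int) → List Int → List Int
  | 0, _, ans => PySem.List.slice ans none (some 2)   -- fuel exhausted: unreachable inside Pre_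
  | f+1, arr, ans =>
    if arr.length ≠ 1 then
      let st := (List.range (arr.length / 2)).foldl (passOuter arr) (ans, ([] : List (List Int)))
      solGo f st.2 st.1
    else
      -- answer[arr[0][0]] += 1; return answer[:2]
      let v := gget arr 0 0
      PySem.List.slice (PySem.List.pySetD ans v (PySem.List.pyGetD ans v 0 + 1)) none (some 2)

def solution (arr : List (List Int)) : List Int := solGo (arr.length + 1) arr [0, 0, 0]

-- ===== PORT B =====
-- all(arr[r+i][c+j] == v for i in range(size) for j in range(size))
def uniformB (arr : List (List Int)) (r c size : Nat) (v : Int) : Bool :=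
  (List.range size).all fun i => (List.range size).all fun j => gget arr (r+i) (c+j) == v

-- rec(r, c, size) of B, threading the two-element answer list
def recB (arr : List (List Int)) (r c : Nat) (size : Nat) (ans : List Int) : List Int :=
  let v := gget arr r c
  if h : uniformB arr r c size v then
    -- if v == 0 or v == 1: answer[v] += 1
    if v = 0 ∨ v = 1 then PySem.List.pySetD ans v (PySem.List.pyGetD ans v 0 + 1) else ans
  else
    recB arr (r+size/2) (c+size/2) (size/2)
      (recB arr (r+size/2) c (size/2)
        (recB arr r (c+size/2) (size/2)
          (recB arr r c (size/2) ans)))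
termination_by size
decreasing_by
  all_goals
    refine Nat.div_lt_self ?_ one_lt_two
    rcases Nat.eq_zero_or_pos size with h0 | h0
    · subst h0; simp [uniformB] at h
    · exact h0

def solution_alt (arr : List (List Int)) : List Int := recB arr 0 0 arr.length [0, 0]

-- ===== PRECONDITION & SPEC =====
-- Pre_ is exactly the inputs A returns on: a nonempty 2^k-row grid whose rows all
-- have at least 2^k entries (A only ever reads the square 2^k × 2^k prefix), and
-- which, if that prefix is uniform, has its value in [-3, 2] (otherwise the final
-- answer[arr[0][0]] raises IndexError). Elsewhere A raises or loops forever.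
def Pre_solution (arr : List (List Int)) : Prop :=
  0 < arr.length ∧ arr.length = 2 ^ Nat.log2 arr.length ∧
  (∀ row ∈ arr, arr.length ≤ row.length) ∧
  ((∀ i, i < arr.length → ∀ j, j < arr.length →
      (arr.getD i []).getD j 0 = (arr.getD 0 []).getD 0 0) →
    (-3 ≤ (arr.getD 0 []).getD 0 0 ∧ (arr.getD 0 []).getD 0 0 ≤ 2))
instance (arr : List (List Int)) : Decidable (Pre_solution arr) := by
  unfold Pre_solution; infer_instance

def pvWitness_solution : List (List Int) := [[1, 1, 0, 0], [1, 0, 1, 1], [1, 1, 1, 1], [1, 1, 1, 1]]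

-- On a grid whose square prefix is uniformly -2 (or -3), A's final
-- `answer[arr[0][0]] += 1` wraps around the 3-element answer list and reports one
-- 1-block (or one 0-block) that does not exist, returning [0, 1] (resp. [1, 0]);
-- B returns the intended tally [0, 0]: values other than 0 and 1 are never counted.
def D_solution (arr : List (List Int)) : Prop :=
  (∀ i, i < arr.length → ∀ j, j < arr.length →
    (arr.getD i []).getD j 0 = (arr.getD 0 []).getD 0 0) ∧
  ((arr.getD 0 []).getD 0 0 = -2 ∨ (arr.getD 0 []).getD 0 0 = -3)
instance (arr : List (List Int)) : Decidable (D_solution arr) := by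
  unfold D_solution; infer_instance

def Spec_solution (arr : List (List Int)) (out : List Int) : Prop :=
  ¬ D_solution arr → out = solution_alt arr
instance (arr : List (List Int)) (out : List Int) : Decidable (Spec_solution arr out) := by
  unfold Spec_solution; infer_instance

def pvDiffWitness_solution : List (List Int) := [[-2]]
def pvDiffWitnessOut_solution : (List Int) × (List Int) := ([0, 1], [0, 0])

-- ===== CLAIM (what is proved, stated in full; the proofs are below) =====
def Claim_unchanged_solution : Prop :=
  ∀ (arr : List (List Int)), Dom_solution arr → Pre_solution arr → Spec_solution arr (solution arr)
def Claim_changed_solution : Prop :=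
  Dom_solution (pvDiffWitness_solution) ∧ Pre_solution (pvDiffWitness_solution) ∧
  D_solution (pvDiffWitness_solution) ∧
  solution (pvDiffWitness_solution) = pvDiffWitnessOut_solution.1 ∧
  solution_alt (pvDiffWitness_solution) = pvDiffWitnessOut_solution.2 ∧
  pvDiffWitnessOut_solution.1 ≠ pvDiffWitnessOut_solution.2
def Claim_exact_solution : Prop :=
  ∀ (arr : List (List Int)), Dom_solution arr → Pre_solution arr → D_solution arr →
    solution arr ≠ solution_alt arr

-- ===== LEMMAS AND PROOFS =====

-- value tally of one quadtree leaf: (is it a 0-leaf?, is it a 1-leaf?)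
def ev (v : Int) : Int × Int := (if v = 0 then 1 else 0, if v = 1 then 1 else 0)

-- the extra tally A's final wraparound bump adds beyond ev (nonzero only at -3/-2)
def dA (v : Int) : Int × Int := (if v = -3 then 1 else 0, if v = -2 then 1 else 0)

-- block (r,c)..(r+s-1,c+s-1) is uniformly v
def Up (g : List (List Int)) (r c s : Nat) (v : Int) : Prop :=
  ∀ i, i < s → ∀ j, j < s → gget g (r+i) (c+j) = v

-- the label A's merging assigns to the whole n×n grid: its value if uniform, else 2
def RootL (g : List (List Int)) (n : Nat) : Int :=
  if uniformB g 0 0 n (gget g 0 0) then gget g 0 0 else 2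

-- the value A's pass writes into _next[i][j]
def nextV (g : List (List Int)) (i j : Nat) : Int :=
  if (PySem.Set.ofList (cellList g (2*i) (2*j))).length ≠ 1 then 2 else gget g (2*i) (2*j)

-- the (0-count, 1-count) A's pass adds to answer at block (i,j)
def contrib (g : List (List Int)) (i j : Nat) : Int × Int :=
  if (PySem.Set.ofList (cellList g (2*i) (2*j))).length ≠ 1 then
    ((PySem.List.count (cellList g (2*i) (2*j)) 0 : Int), (PySem.List.count (cellList g (2*i) (2*j)) 1 : Int))
  else 0

def nextG (g : List (List Int)) (m : Nat) : List (List Int) :=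
  (List.range m).map fun i => (List.range m).map fun j => nextV g i j

def Csum (g : List (List Int)) (r c s : Nat) : Int × Int :=
  ((List.range s).map fun i => ((List.range s).map fun j => contrib g (r+i) (c+j)).sum).sum

-- 0/1-leaf tallies of the quadtree of block (r,c,size): the value recB accumulates
def Lc (g : List (List Int)) (r c : Nat) (size : Nat) : Int × Int :=
  if h : uniformB g r c size (gget g r c) then ev (gget g r c)
  else
    Lc g r c (size/2) + Lc g r (c+size/2) (size/2)
      + Lc g (r+size/2) c (size/2) + Lc g (r+size/2) (c+size/2) (size/2)
termination_by size
decreasing_by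
  all_goals
    refine Nat.div_lt_self ?_ one_lt_two
    rcases Nat.eq_zero_or_pos size with h0 | h0
    · subst h0; simp [uniformB] at h
    · exact h0

lemma ev_two : ev 2 = 0 := by decide

lemma set_ofList_len_one (a b c d : Int) :
    (PySem.Set.ofList [a,b,c,d]).length = 1 ↔ b = a ∧ c = a ∧ d = a := by
  constructor
  · intro h
    obtain ⟨x, hx⟩ := List.length_eq_one_iff.mp h
    have ha : a ∈ PySem.Set.ofList [a,b,c,d] := by rw [PySem.Set.mem_ofList]; simp
    have hb : b ∈ PySem.Set.ofList [a,b,c,d] := by rw [PySem.Set.mem_ofList]; simp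
    have hc : c ∈ PySem.Set.ofList [a,b,c,d] := by rw [PySem.Set.mem_ofList]; simp
    have hd : d ∈ PySem.Set.ofList [a,b,c,d] := by rw [PySem.Set.mem_ofList]; simp
    rw [hx] at ha hb hc hd; simp at ha hb hc hd; simp [ha, hb, hc, hd]
  · rintro ⟨rfl, rfl, rfl⟩; simp [PySem.Set.ofList, PySem.Set.add]

-- len(set(_sum)) == 1 means the three other cells equal the top-left one
lemma cell_len_one (g : List (List Int)) (I J : Nat) :
    (PySem.Set.ofList (cellList g I J)).length = 1 ↔
      gget g (I+1) J = gget g I J ∧ gget g I (J+1) = gget g I J ∧ gget g (I+1) (J+1) = gget g I J := by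
  simp only [cellList]; exact set_ofList_len_one _ _ _ _

lemma up_two_iff (g : List (List Int)) (I J : Nat) :
    Up g I J 2 (gget g I J) ↔
      gget g (I+1) J = gget g I J ∧ gget g I (J+1) = gget g I J ∧ gget g (I+1) (J+1) = gget g I J := by
  constructor
  · intro h
    refine ⟨?_, ?_, ?_⟩
    · simpa using h 1 (by omega) 0 (by omega)
    · simpa using h 0 (by omega) 1 (by omega)
    · simpa using h 1 (by omega) 1 (by omega)
  · rintro ⟨hB, hC, hD⟩ i hi j hj
    interval_cases i <;> interval_cases j <;> simp [hB, hC, hD]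

lemma uniformB_iff (g : List (List Int)) (r c s : Nat) (v : Int) :
    uniformB g r c s v = true ↔ Up g r c s v := by
  simp [uniformB, Up, List.all_eq_true]

lemma Up_val {g : List (List Int)} {r c s : Nat} {v : Int} (hs : 0 < s) (h : Up g r c s v) :
    gget g r c = v := by
  simpa using h 0 hs 0 hs

lemma Up_sub {g : List (List Int)} {r c s : Nat} {v : Int} (h : Up g r c s v)
    (i0 j0 s' : Nat) (hi : i0 + s' ≤ s) (hj : j0 + s' ≤ s) : Up g (r+i0) (c+j0) s' v := by
  intro i hi' j hj'
  have := h (i0+i) (by omega) (j0+j) (by omega)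
  simpa [Nat.add_assoc] using this

lemma Lc_eq_uniform {g : List (List Int)} {r c s : Nat} {v : Int} (hs : 0 < s)
    (h : Up g r c s v) : Lc g r c s = ev v := by
  have hv : gget g r c = v := Up_val hs h
  rw [Lc, dif_pos ((uniformB_iff g r c s (gget g r c)).mpr (hv ▸ h)), hv]

lemma Lc_one (g : List (List Int)) (r c : Nat) : Lc g r c 1 = ev (gget g r c) := by
  refine Lc_eq_uniform (by omega) ?_
  intro i hi j hj
  interval_cases i; interval_cases j; simp

lemma Lc_eq_split {g : List (List Int)} {r c s : Nat}
    (h : ¬ Up g r c s (gget g r c)) :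
    Lc g r c s =
      Lc g r c (s/2) + Lc g r (c+(s/2)) (s/2) + Lc g (r+(s/2)) c (s/2) + Lc g (r+(s/2)) (c+(s/2)) (s/2) := by
  rw [Lc, dif_neg (by rw [uniformB_iff]; exact h)]

-- pySetD/pyGetD computations on the literal answer lists
lemma bumpA (a b c' n0 n1 : Int) :
    PySem.List.pySetD (PySem.List.pySetD [a,b,c'] 0 (PySem.List.pyGetD [a,b,c'] 0 0 + n0)) 1
      (PySem.List.pyGetD (PySem.List.pySetD [a,b,c'] 0 (PySem.List.pyGetD [a,b,c'] 0 0 + n0)) 1 0 + n1)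
    = [a + n0, b + n1, c'] := by
  simp [PySem.List.pySetD, PySem.List.pySet?, PySem.List.pyIdx?, PySem.List.pyGetD]

-- B's guarded bump: answer[v] += 1 only for v = 0 or 1; it adds exactly ev v
lemma bump2 (a b v : Int) :
    (if v = 0 ∨ v = 1 then PySem.List.pySetD [a,b] v (PySem.List.pyGetD [a,b] v 0 + 1) else [a,b])
      = [a + (ev v).1, b + (ev v).2] := by
  by_cases h0 : v = 0
  · subst h0
    simp [PySem.List.pySetD, PySem.List.pySet?, PySem.List.pyIdx?, PySem.List.pyGetD, ev]
  · by_cases h1 : v = 1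
    · subst h1
      simp [PySem.List.pySetD, PySem.List.pySet?, PySem.List.pyIdx?, PySem.List.pyGetD, ev]
    · rw [if_neg (by tauto)]
      simp [ev, h0, h1]

-- A's final bump answer[arr[0][0]] += 1 followed by answer[:2], for any index
-- Python accepts on the 3-element list: it adds ev v plus the wraparound extra dA v
lemma bump3 (a b c' v : Int) (hv : -3 ≤ v ∧ v ≤ 2) :
    PySem.List.slice (PySem.List.pySetD [a,b,c'] v (PySem.List.pyGetD [a,b,c'] v 0 + 1)) none (some 2)
      = [a + (ev v).1 + (dA v).1, b + (ev v).2 + (dA v).2] := by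
  have htake : ∀ l : List Int, PySem.List.slice l none (some 2) = l.take 2 := by
    intro l
    rw [show (2:Int) = ((2:Nat):Int) by norm_num, PySem.List.slice_to_natCast]
  obtain ⟨h1, h2⟩ := hv
  interval_cases v <;>
    simp [PySem.List.pySetD, PySem.List.pySet?, PySem.List.pyIdx?, PySem.List.pyGetD,
      PySem.List.pyGet?, ev, dA, htake]

lemma length_nextG (g : List (List Int)) (m : Nat) : (nextG g m).length = m := by
  simp [nextG]

lemma gget_nextG {g : List (List Int)} {m i j : Nat} (hi : i < m) (hj : j < m) :
    gget (nextG g m) i j = nextV g i j := by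
  have hrow : (nextG g m).getD i [] = (List.range m).map fun j => nextV g i j := by
    unfold nextG
    rw [List.getD_eq_getElem _ _ (by simpa using hi)]
    simp
  unfold gget
  rw [hrow, List.getD_eq_getElem _ _ (by simpa using hj)]
  simp

lemma transfer_fwd {g : List (List Int)} {m r c s : Nat} {v : Int}
    (hrm : r + s ≤ m) (hcm : c + s ≤ m)
    (h : Up g (2*r) (2*c) (2*s) v) : Up (nextG g m) r c s v := by
  intro i hi j hj
  rw [gget_nextG (by omega) (by omega), nextV]
  have hA : gget g (2*(r+i)) (2*(c+j)) = v := by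
    have := h (2*i) (by omega) (2*j) (by omega)
    rw [← this]; congr 1 <;> ring
  have hB : gget g (2*(r+i)+1) (2*(c+j)) = v := by
    have := h (2*i+1) (by omega) (2*j) (by omega)
    rw [← this]; congr 1 <;> ring
  have hC : gget g (2*(r+i)) (2*(c+j)+1) = v := by
    have := h (2*i) (by omega) (2*j+1) (by omega)
    rw [← this]; congr 1 <;> ring
  have hD : gget g (2*(r+i)+1) (2*(c+j)+1) = v := by
    have := h (2*i+1) (by omega) (2*j+1) (by omega)
    rw [← this]; congr 1 <;> ring
  rw [if_neg (by rw [not_not, cell_len_one]; exact ⟨hB.trans hA.symm, hC.trans hA.symm, hD.trans hA.symm⟩)]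
  exact hA

lemma transfer_back {g : List (List Int)} {m r c s : Nat} {v : Int}
    (hrm : r + s ≤ m) (hcm : c + s ≤ m)
    (hv : v ≠ 2) (h : Up (nextG g m) r c s v) : Up g (2*r) (2*c) (2*s) v := by
  intro i hi j hj
  have hcell := h (i/2) (by omega) (j/2) (by omega)
  rw [gget_nextG (by omega) (by omega), nextV] at hcell
  by_cases hmix : (PySem.Set.ofList (cellList g (2*(r+i/2)) (2*(c+j/2)))).length ≠ 1
  · rw [if_pos hmix] at hcell; exact absurd hcell.symm hv
  · rw [if_neg hmix] at hcell
    rw [not_not, cell_len_one] at hmix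
    obtain ⟨hB, hC, hD⟩ := hmix
    have hi2 : 2*r+i = 2*(r+i/2) + i%2 := by omega
    have hj2 : 2*c+j = 2*(c+j/2) + j%2 := by omega
    rw [hi2, hj2]
    rcases Nat.mod_two_eq_zero_or_one i with h1 | h1 <;>
      rcases Nat.mod_two_eq_zero_or_one j with h2 | h2 <;>
      simp only [h1, h2, Nat.add_zero] <;>
      first
        | exact hcell
        | (rw [hB]; exact hcell)
        | (rw [hC]; exact hcell)
        | (rw [hD]; exact hcell)

lemma contrib_zero_of_up {g : List (List Int)} {i j : Nat} {v : Int}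
    (h : Up g (2*i) (2*j) 2 v) : contrib g i j = 0 := by
  have hv : gget g (2*i) (2*j) = v := Up_val (by omega) h
  rw [contrib, if_neg]
  rw [not_not, cell_len_one]
  exact (up_two_iff g (2*i) (2*j)).mp (hv ▸ h)

lemma map_sum_range_add (t u : Nat) (f : Nat → Int × Int) :
    ((List.range (t+u)).map f).sum
      = ((List.range t).map f).sum + ((List.range u).map (fun i => f (t+i))).sum := by
  rw [List.range_add]; simp [List.map_map, Function.comp_def]

lemma list_sum_add (l : List Nat) (f f' : Nat → Int × Int) :
    (l.map fun i => f i + f' i).sum = (l.map f).sum + (l.map f').sum := by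
  induction l with
  | nil => simp
  | cons x l ih => simp only [List.map_cons, List.sum_cons, ih]; abel

lemma Csum_split (g : List (List Int)) (r c t : Nat) :
    Csum g r c (2*t)
      = Csum g r c t + Csum g r (c+t) t + Csum g (r+t) c t + Csum g (r+t) (c+t) t := by
  have hrow : ∀ R, ((List.range (2*t)).map fun j => contrib g R (c+j)).sum
      = ((List.range t).map fun j => contrib g R (c+j)).sum
        + ((List.range t).map fun j => contrib g R ((c+t)+j)).sum := by
    intro R
    rw [two_mul, map_sum_range_add]
    congr 1
    refine congrArg List.sum ?_
    apply List.map_congr_left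
    intro x _; congr 1; omega
  unfold Csum
  calc ((List.range (2*t)).map fun i => ((List.range (2*t)).map fun j => contrib g (r+i) (c+j)).sum).sum
      = ((List.range (2*t)).map fun i =>
          (((List.range t).map fun j => contrib g (r+i) (c+j)).sum
            + ((List.range t).map fun j => contrib g (r+i) ((c+t)+j)).sum)).sum := by
        apply congrArg
        apply List.map_congr_left
        intro i _; exact hrow (r+i)
    _ = ((List.range (2*t)).map fun i => ((List.range t).map fun j => contrib g (r+i) (c+j)).sum).sum
        + ((List.range (2*t)).map fun i => ((List.range t).map fun j => contrib g (r+i) ((c+t)+j)).sum).sum := by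
        exact list_sum_add _ _ _
    _ = _ := by
        rw [two_mul, map_sum_range_add, map_sum_range_add]
        have e1 : ((List.range t).map fun i => ((List.range t).map fun j => contrib g (r+(t+i)) (c+j)).sum)
            = ((List.range t).map fun i => ((List.range t).map fun j => contrib g ((r+t)+i) (c+j)).sum) := by
          apply List.map_congr_left; intro i _; congr 2; funext j; congr 1; omega
        have e2 : ((List.range t).map fun i => ((List.range t).map fun j => contrib g (r+(t+i)) ((c+t)+j)).sum)
            = ((List.range t).map fun i => ((List.range t).map fun j => contrib g ((r+t)+i) ((c+t)+j)).sum) := by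
          apply List.map_congr_left; intro i _; congr 2; funext j; congr 1; omega
        rw [e1, e2]
        abel

lemma Csum_zero {g : List (List Int)} {r c s : Nat}
    (h : ∀ i, i < s → ∀ j, j < s → contrib g (r+i) (c+j) = 0) : Csum g r c s = 0 := by
  unfold Csum
  apply List.sum_eq_zero
  intro x hx
  simp only [List.mem_map, List.mem_range] at hx
  obtain ⟨i, hi, rfl⟩ := hx
  apply List.sum_eq_zero
  intro y hy
  simp only [List.mem_map, List.mem_range] at hy
  obtain ⟨j, hj, rfl⟩ := hy
  exact h i hi j hj

lemma Csum_one (g : List (List Int)) (r c : Nat) : Csum g r c 1 = contrib g r c := by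
  simp [Csum]

lemma count_cells (A B C D : Int) :
    ev A + ev C + ev B + ev D
      = ((PySem.List.count [A,B,C,D] 0 : Int), (PySem.List.count [A,B,C,D] 1 : Int)) := by
  rw [PySem.List.count_eq, PySem.List.count_eq]
  simp only [List.count_cons, List.count_nil, ev, Prod.mk_add_mk, Prod.mk.injEq, beq_iff_eq]
  constructor <;> (push_cast; split_ifs <;> omega)

-- one merge pass preserves the 0/1 quadtree leaf tallies:
-- tallies of a 2s-block of g = pass contributions in it + tallies of the s-block of _next
lemma Glem {g : List (List Int)} {m : Nat} :
    ∀ (j r c : Nat), r + 2^j ≤ m → c + 2^j ≤ m →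
      Lc g (2*r) (2*c) (2 * 2^j) = Csum g r c (2^j) + Lc (nextG g m) r c (2^j) := by
  intro j
  induction j with
  | zero =>
    intro r c hrm hcm
    simp only [pow_zero, mul_one] at *
    rw [Csum_one, Lc_one, gget_nextG (by omega) (by omega), nextV]
    by_cases hmix : (PySem.Set.ofList (cellList g (2*r) (2*c))).length ≠ 1
    · rw [if_pos hmix, contrib, if_pos hmix, ev_two, add_zero]
      have hnu : ¬ Up g (2*r) (2*c) 2 (gget g (2*r) (2*c)) := by
        rw [up_two_iff]
        intro hup
        exact hmix ((cell_len_one g (2*r) (2*c)).mpr hup)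
      rw [Lc_eq_split hnu]
      norm_num
      rw [Lc_one, Lc_one, Lc_one, Lc_one]
      exact count_cells _ _ _ _
    · rw [if_neg hmix, contrib, if_neg hmix, zero_add]
      rw [not_not, cell_len_one] at hmix
      exact Lc_eq_uniform (by omega) ((up_two_iff g (2*r) (2*c)).mpr hmix)
  | succ j ih =>
    intro r c hrm hcm
    have h2 : (2:Nat)^(j+1) = 2*2^j := by rw [pow_succ]; ring
    have hpos : 0 < 2*2^j := by positivity
    by_cases hU : Up g (2*r) (2*c) (2*(2*2^j)) (gget g (2*r) (2*c))
    · rw [h2, Lc_eq_uniform (by positivity) hU,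
        Lc_eq_uniform hpos (transfer_fwd (by omega) (by omega) hU), Csum_zero, zero_add]
      intro i hi j' hj'
      refine contrib_zero_of_up (v := gget g (2*r) (2*c)) ?_
      have hsub := Up_sub hU (2*i) (2*j') 2 (by omega) (by omega)
      intro i' hi' j'' hj''
      have := hsub i' hi' j'' hj''
      rw [← this]; congr 1 <;> ring
    · rw [h2]
      rw [Lc_eq_split hU]
      have hdiv : (2*(2*2^j))/2 = 2*2^j := by omega
      rw [hdiv]
      have hb : (2:Nat)^j ≤ 2*2^j := by omega
      have q1 := ih r c (by omega) (by omega)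
      have q2 : Lc g (2*r) (2*c+2*2^j) (2*2^j) = Csum g r (c+2^j) (2^j) + Lc (nextG g m) r (c+2^j) (2^j) := by
        have := ih r (c+2^j) (by omega) (by omega); rw [← this]; congr 1; ring
      have q3 : Lc g (2*r+2*2^j) (2*c) (2*2^j) = Csum g (r+2^j) c (2^j) + Lc (nextG g m) (r+2^j) c (2^j) := by
        have := ih (r+2^j) c (by omega) (by omega); rw [← this]; congr 1; ring
      have q4 : Lc g (2*r+2*2^j) (2*c+2*2^j) (2*2^j)
          = Csum g (r+2^j) (c+2^j) (2^j) + Lc (nextG g m) (r+2^j) (c+2^j) (2^j) := by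
        have := ih (r+2^j) (c+2^j) (by omega) (by omega); rw [← this]; congr 1 <;> ring
      rw [q1, q2, q3, q4]
      have hCs : Csum g r c (2*2^j)
          = Csum g r c (2^j) + Csum g r (c+2^j) (2^j) + Csum g (r+2^j) c (2^j) + Csum g (r+2^j) (c+2^j) (2^j) :=
        Csum_split g r c (2^j)
      have hLn : Lc (nextG g m) r c (2*2^j)
          = Lc (nextG g m) r c (2^j) + Lc (nextG g m) r (c+2^j) (2^j)
            + Lc (nextG g m) (r+2^j) c (2^j) + Lc (nextG g m) (r+2^j) (c+2^j) (2^j) := by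
        by_cases hUN : Up (nextG g m) r c (2*2^j) (gget (nextG g m) r c)
        · by_cases hw2 : gget (nextG g m) r c = 2
          · have h0 : Lc (nextG g m) r c (2*2^j) = 0 := by
              rw [Lc_eq_uniform (by positivity) (hw2 ▸ hUN), ev_two]
            have hq : ∀ i0 j0, i0 + 2^j ≤ 2*2^j → j0 + 2^j ≤ 2*2^j →
                Lc (nextG g m) (r+i0) (c+j0) (2^j) = 0 := by
              intro i0 j0 hi0 hj0
              rw [Lc_eq_uniform (by positivity) (Up_sub (hw2 ▸ hUN) i0 j0 (2^j) hi0 hj0), ev_two]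
            have e1 := hq 0 0 (by omega) (by omega)
            have e2 := hq 0 (2^j) (by omega) (by omega)
            have e3 := hq (2^j) 0 (by omega) (by omega)
            have e4 := hq (2^j) (2^j) (by omega) (by omega)
            simp only [Nat.add_zero] at e1 e2 e3 e4
            rw [h0, e1, e2, e3, e4]; abel
          · exfalso
            apply hU
            have hb' := transfer_back (by omega) (by omega) hw2 hUN
            have hv := Up_val (s := 2*(2*2^j)) (by positivity) hb'
            rw [hv]; exact hb'
        · rw [Lc_eq_split hUN]
          have : (2*2^j)/2 = 2^j := by omega
          rw [this]
      rw [hCs, hLn]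
      abel

-- the root label survives one pass
lemma RootL_nextG {g : List (List Int)} {m : Nat} (hm : 0 < m) :
    RootL (nextG g m) m = RootL g (2*m) := by
  unfold RootL
  by_cases hU : Up g (2*0) (2*0) (2*m) (gget g 0 0)
  · have hfwd : Up (nextG g m) 0 0 m (gget g 0 0) := transfer_fwd (by omega) (by omega) hU
    have h00 : gget (nextG g m) 0 0 = gget g 0 0 := Up_val hm hfwd
    rw [if_pos (by rw [uniformB_iff, h00]; exact hfwd), h00,
      if_pos (by rw [uniformB_iff]; simpa using hU)]
  · conv_rhs => rw [if_neg (by rw [uniformB_iff]; simpa using hU)]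
    by_cases hUN : uniformB (nextG g m) 0 0 m (gget (nextG g m) 0 0)
    · rw [if_pos hUN]
      by_cases hw2 : gget (nextG g m) 0 0 = 2
      · exact hw2
      · exfalso
        apply hU
        have hb := transfer_back (m := m) (by omega) (by omega) hw2 ((uniformB_iff _ _ _ _ _).mp hUN)
        have hv := Up_val (s := 2*m) (by omega) hb
        simp only [Nat.mul_zero] at hb hv
        rw [hv]
        simpa using hb
    · rw [if_neg hUN]

-- recB threads its accumulator additively: it adds the block's 0/1 leaf tallies
lemma AccB (g : List (List Int)) :
    ∀ (s r c : Nat) (a b : Int),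
      recB g r c s [a,b] = [a + (Lc g r c s).1, b + (Lc g r c s).2] := by
  intro s
  induction s using Nat.strong_induction_on with
  | _ s ih =>
    intro r c a b
    rw [recB, Lc]
    by_cases hu : uniformB g r c s (gget g r c)
    · rw [dif_pos hu, dif_pos hu]
      exact bump2 a b _
    · rw [dif_neg hu, dif_neg hu]
      have hs : s ≠ 0 := by
        intro h0; subst h0; simp [uniformB] at hu
      have hlt : s/2 < s := Nat.div_lt_self (by omega) one_lt_two
      rw [ih _ hlt, ih _ hlt, ih _ hlt, ih _ hlt]
      simp only [Prod.fst_add, Prod.snd_add, List.cons.injEq, and_true]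
      exact ⟨by ring, by ring⟩

-- the inner for-loop of one pass of A
lemma passRow_mixed {g : List (List Int)} {i2 j2 : Nat}
    (hmix : (PySem.Set.ofList (cellList g (2*i2) (2*j2))).length ≠ 1)
    (a0 a1 a2 : Int) (acc : List Int) :
    passRow g i2 ([a0,a1,a2], acc) j2
      = ([a0 + (PySem.List.count (cellList g (2*i2) (2*j2)) 0 : Int),
          a1 + (PySem.List.count (cellList g (2*i2) (2*j2)) 1 : Int), a2], acc ++ [(2:Int)]) := by
  unfold passRow
  rw [if_pos hmix]
  dsimp only
  rw [bumpA]

lemma passRow_pure {g : List (List Int)} {i2 j2 : Nat}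
    (hmix : ¬ (PySem.Set.ofList (cellList g (2*i2) (2*j2))).length ≠ 1)
    (a0 a1 a2 : Int) (acc : List Int) :
    passRow g i2 ([a0,a1,a2], acc) j2 = ([a0, a1, a2], acc ++ [gget g (2*i2) (2*j2)]) := by
  unfold passRow
  rw [if_neg hmix]
  simp [cellList, PySem.List.pyGetD_zero_cons, gget]

lemma rowfold (g : List (List Int)) (i2 : Nat) :
    ∀ (l : List Nat) (a0 a1 a2 : Int) (acc : List Int),
      l.foldl (passRow g i2) ([a0,a1,a2], acc)
      = ([a0 + ((l.map fun j2 => contrib g i2 j2).sum).1,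
          a1 + ((l.map fun j2 => contrib g i2 j2).sum).2, a2],
         acc ++ l.map fun j2 => nextV g i2 j2) := by
  intro l
  induction l with
  | nil => simp
  | cons j2 l ihl =>
    intro a0 a1 a2 acc
    rw [List.foldl_cons]
    by_cases hmix : (PySem.Set.ofList (cellList g (2*i2) (2*j2))).length ≠ 1
    · rw [passRow_mixed hmix, ihl]
      have hc : contrib g i2 j2
          = ((PySem.List.count (cellList g (2*i2) (2*j2)) 0 : Int),
             (PySem.List.count (cellList g (2*i2) (2*j2)) 1 : Int)) := by
        rw [contrib, if_pos hmix]
      have hn : nextV g i2 j2 = 2 := by rw [nextV, if_pos hmix]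
      simp only [List.map_cons, List.sum_cons, hc, hn, Prod.fst_add, Prod.snd_add]
      simp [add_assoc]
    · rw [passRow_pure hmix, ihl]
      have hc : contrib g i2 j2 = 0 := by rw [contrib, if_neg hmix]
      have hn : nextV g i2 j2 = gget g (2*i2) (2*j2) := by rw [nextV, if_neg hmix]
      simp only [List.map_cons, List.sum_cons, hc, hn, zero_add]
      simp

-- the outer for-loop of one pass of A
lemma passfold (g : List (List Int)) :
    ∀ (l : List Nat) (a0 a1 a2 : Int) (acc : List (List Int)),
      l.foldl (passOuter g) ([a0,a1,a2], acc)
      = ([a0 + ((l.map fun i2 => ((List.range (g.length/2)).map fun j2 => contrib g i2 j2).sum).sum).1,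
          a1 + ((l.map fun i2 => ((List.range (g.length/2)).map fun j2 => contrib g i2 j2).sum).sum).2, a2],
         acc ++ l.map fun i2 => (List.range (g.length/2)).map fun j2 => nextV g i2 j2) := by
  intro l
  induction l with
  | nil => simp
  | cons i2 l ihl =>
    intro a0 a1 a2 acc
    rw [List.foldl_cons]
    have hstep : passOuter g ([a0,a1,a2], acc) i2
        = ([a0 + (((List.range (g.length/2)).map fun j2 => contrib g i2 j2).sum).1,
            a1 + (((List.range (g.length/2)).map fun j2 => contrib g i2 j2).sum).2, a2],
           acc ++ [(List.range (g.length/2)).map fun j2 => nextV g i2 j2]) := by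
      unfold passOuter
      rw [rowfold g i2 (List.range (g.length/2)) a0 a1 a2 []]
      simp
    rw [hstep, ihl]
    simp only [List.map_cons, List.sum_cons, Prod.fst_add, Prod.snd_add]
    simp [add_assoc]

-- A's while-loop: total 0/1 leaf tallies plus the final wraparound extra
lemma solGo_main : ∀ (k f : Nat) (g : List (List Int)), g.length = 2^k →
    -3 ≤ RootL g (2^k) → RootL g (2^k) ≤ 2 →
    ∀ (a0 a1 a2 : Int), k < f →
      solGo f g [a0,a1,a2]
        = [a0 + (Lc g 0 0 (2^k)).1 + (dA (RootL g (2^k))).1,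
           a1 + (Lc g 0 0 (2^k)).2 + (dA (RootL g (2^k))).2] := by
  intro k
  induction k with
  | zero =>
    intro f g hlen hr1 hr2 a0 a1 a2 hf
    match f, hf with
    | f+1, _ =>
      rw [solGo]
      rw [if_neg (by omega)]
      have hroot : RootL g 1 = gget g 0 0 := by
        unfold RootL
        rw [if_pos]
        rw [uniformB_iff]
        intro i hi j hj
        interval_cases i
        interval_cases j
        simp
      simp only [pow_zero] at hr1 hr2 ⊢
      rw [hroot] at hr1 hr2
      simp only [Lc_one, hroot]
      exact bump3 a0 a1 a2 _ ⟨hr1, hr2⟩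
  | succ k ih =>
    intro f g hlen hr1 hr2 a0 a1 a2 hf
    match f, hf with
    | f+1, hf =>
      have hp : 0 < 2^k := Nat.two_pow_pos k
      have hlen2 : g.length = 2*2^k := by rw [hlen, pow_succ]; ring
      have hm : g.length / 2 = 2^k := by omega
      rw [solGo]
      rw [if_pos (by omega)]
      have hfold := passfold g (List.range (g.length/2)) a0 a1 a2 []
      rw [hm] at hfold
      have hnext : ((List.range (2^k)).map fun i2 => (List.range (2^k)).map fun j2 => nextV g i2 j2)
          = nextG g (2^k) := rfl
      have hcs : ((List.range (2^k)).map fun i2 => ((List.range (2^k)).map fun j2 => contrib g i2 j2).sum).sum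
          = Csum g 0 0 (2^k) := by
        unfold Csum
        simp only [Nat.zero_add]
      rw [hnext, hcs, List.nil_append] at hfold
      rw [hm, hfold]
      have hRL : RootL (nextG g (2^k)) (2^k) = RootL g (2^(k+1)) := by
        rw [RootL_nextG hp, ← pow_succ']
      rw [ih f (nextG g (2^k)) (length_nextG g (2^k)) (by rw [hRL]; exact hr1) (by rw [hRL]; exact hr2)
        _ _ _ (by omega)]
      have hG := Glem (g := g) (m := 2^k) k 0 0 (by omega) (by omega)
      simp only [Nat.mul_zero] at hG
      have hL : Lc g 0 0 (2^(k+1)) = Csum g 0 0 (2^k) + Lc (nextG g (2^k)) 0 0 (2^k) := by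
        rw [pow_succ, Nat.mul_comm (2^k) 2]; exact hG
      rw [hL, hRL]
      simp only [Prod.fst_add, Prod.snd_add, List.cons.injEq, and_true]
      exact ⟨by ring, by ring⟩

-- Up at the origin, in the prefix-uniformity form Pre_/D_ use
lemma Up_zero_iff (g : List (List Int)) (s : Nat) (v : Int) :
    Up g 0 0 s v ↔ ∀ i, i < s → ∀ j, j < s → gget g i j = v := by
  unfold Up
  constructor <;> (intro h i hi j hj; simpa using h i hi j hj)

-- definitional bridge between the inlined accessor of Pre_/D_ and gget
lemma gg (arr : List (List Int)) (i j : Nat) :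
    (arr.getD i ([] : List Int)).getD j (0 : Int) = gget arr i j := rfl

-- the two return values, for any input of Pre_
lemma solution_eq {arr : List (List Int)} (hpre : Pre_solution arr) :
    solution arr
      = [(Lc arr 0 0 arr.length).1 + (dA (RootL arr arr.length)).1,
         (Lc arr 0 0 arr.length).2 + (dA (RootL arr arr.length)).2] := by
  obtain ⟨hpos, hpow, _, hroot⟩ := hpre
  have hr : -3 ≤ RootL arr arr.length ∧ RootL arr arr.length ≤ 2 := by
    unfold RootL
    by_cases hU : uniformB arr 0 0 arr.length (gget arr 0 0)
    · rw [if_pos hU]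
      exact hroot (by simp only [gg]; rw [← Up_zero_iff]; exact (uniformB_iff _ _ _ _ _).mp hU)
    · rw [if_neg hU]; omega
  have hr' := hr
  rw [hpow] at hr'
  unfold solution
  rw [hpow]
  rw [solGo_main (Nat.log2 arr.length) (2 ^ Nat.log2 arr.length + 1) arr hpow hr'.1 hr'.2
    0 0 0 (by have := Nat.lt_two_pow_self (n := Nat.log2 arr.length); omega)]
  simp

lemma solution_alt_eq (arr : List (List Int)) :
    solution_alt arr = [(Lc arr 0 0 arr.length).1, (Lc arr 0 0 arr.length).2] := by
  unfold solution_alt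
  rw [AccB arr arr.length 0 0 0 0]
  simp

-- ===== VERDICT (by name: the statement is the Claim_ definition above) =====
theorem solution_spec : Claim_unchanged_solution := by
  unfold Claim_unchanged_solution
  intro arr _ hpre
  unfold Spec_solution
  intro hD
  rw [solution_eq hpre, solution_alt_eq]
  have hz : dA (RootL arr arr.length) = 0 := by
    unfold RootL
    by_cases hU : uniformB arr 0 0 arr.length (gget arr 0 0)
    · rw [if_pos hU]
      have hup : ∀ i, i < arr.length → ∀ j, j < arr.length → gget arr i j = gget arr 0 0 := by
        rw [← Up_zero_iff]; exact (uniformB_iff _ _ _ _ _).mp hU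
      unfold D_solution at hD
      have : ¬ (gget arr 0 0 = -2 ∨ gget arr 0 0 = -3) := fun h => hD ⟨hup, h⟩
      unfold dA
      rw [if_neg (by omega), if_neg (by omega)]
      rfl
    · rw [if_neg hU]; decide
  rw [hz]
  simp

theorem solution_changed : Claim_changed_solution := by
  unfold Claim_changed_solution
  have hB : solution_alt pvDiffWitness_solution = [0, 0] := by
    rw [solution_alt_eq]
    show [(Lc [[-2]] 0 0 1).1, (Lc [[-2]] 0 0 1).2] = [0, 0]
    rw [Lc_one]
    decide
  refine ⟨by decide, by decide, by decide, by decide, ?_, by decide⟩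
  exact hB

theorem solution_tight : Claim_exact_solution := by
  unfold Claim_exact_solution
  intro arr _ hpre hD
  rw [solution_eq hpre, solution_alt_eq]
  obtain ⟨hup, hv⟩ := hD
  have hroot : RootL arr arr.length = gget arr 0 0 := by
    unfold RootL
    rw [if_pos (by rw [uniformB_iff, Up_zero_iff]; exact hup)]
  rw [hroot]
  have hv2 : gget arr 0 0 = -2 ∨ gget arr 0 0 = -3 := hv
  rcases hv2 with hv2 | hv2 <;>
    rw [hv2] <;> simp [dA] <;> intro h <;> omega
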